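-- pv_equiv track=rewrite | github.com/SaralG5/Y3S1 | binary_boyermoore.py | matched_prefix
-- ===== SOURCE A (Python) =====
-- def matched_prefix(a_string):
--     """
--     This function finds the matched prefix values of a_string. It contains two nested for loops and a bit of right to
--     left comparison with some pointers.
--     @complexity_space and time: O(n) where n is the length of a_string.
--     :param a_string: a string
--     :return: an array corresponding to the matched prefix values for a_string.
--     """
--     str_size = len(a_string)
--     matched_prefix_list = []
--     for k in range(str_size + 1):
--         matched_prefix_list.append(0)
--     start = 0
--     end = str_size - 1
--     while end != 0:
--         counter = 0
--         matches = 0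
--         while end + counter < str_size and a_string[end + counter] == a_string[start + counter]:
--             matches += 1
--             counter += 1
--         matched_prefix_list[end] = matches  # set index to be the number of matches
--         if matched_prefix_list[end] < matched_prefix_list[end + 1]:
--             # if the number of matches is less than previous iteration
--             # set number of matches to the bigger one
--             matched_prefix_list[end] = matched_prefix_list[end + 1]
--         end -= 1
--     # set first index to be the length of the string
--     matched_prefix_list[0] = str_size
--     return matched_prefix_list
-- ===== SOURCE B (Python) =====
-- def matched_prefix(a_string):
--     """Z-algorithm (O(n)) for prefix-match lengths, then one backward suffix-max pass."""
--     n = len(a_string)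
--     z = [0] * (n + 1)
--     l = r = 0
--     for i in range(1, n):
--         k = 0
--         if i < r:
--             k = min(r - i, z[i - l])
--         while i + k < n and a_string[k] == a_string[i + k]:
--             k += 1
--         z[i] = k
--         if i + k > r:
--             l, r = i, i + k
--     out = [0] * (n + 1)
--     acc = 0
--     for i in range(n - 1, 0, -1):
--         acc = max(acc, z[i])
--         out[i] = acc
--     out[0] = n
--     return out
-- ===== Notes on version B (the rewrite author's own statement) =====
-- stated objective: faster
-- what changed: Replaces the per-position naive rescans (quadratic on repetitive strings) with the linear-time Z-algorithm, followed by a separate backward suffix-max pass instead of merging the max into the scanning loop.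
import Mathlib
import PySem

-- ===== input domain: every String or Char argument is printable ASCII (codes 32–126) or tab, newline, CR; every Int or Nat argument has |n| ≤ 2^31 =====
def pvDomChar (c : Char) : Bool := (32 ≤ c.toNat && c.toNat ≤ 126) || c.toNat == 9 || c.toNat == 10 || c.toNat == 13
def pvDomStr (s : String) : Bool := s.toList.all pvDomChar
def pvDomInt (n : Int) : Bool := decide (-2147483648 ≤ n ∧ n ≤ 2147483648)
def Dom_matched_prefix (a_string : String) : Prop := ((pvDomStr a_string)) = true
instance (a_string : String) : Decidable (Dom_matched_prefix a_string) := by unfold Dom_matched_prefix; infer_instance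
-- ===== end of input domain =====

-- B replaces A's per-position naive rescans with the linear-time Z-algorithm plus a separate
-- backward suffix-max pass (objective: faster, asymptotic).

-- ===== PORT A =====
-- A's inner while loop: every reachable index is in range (proved in the lemmas below), so
-- a_string[x] is ported as getD, exact there.
-- fuel (≥ n - (e+c) at every call) only makes the recursion structural; same computation
def pvInnerA (s : List Char) (n e : Nat) : Nat → Nat → Nat → Nat
  | 0, _, m => m
  | fuel + 1, c, m =>
    if e + c < n then
      if s.getD (e + c) ' ' = s.getD c ' ' then pvInnerA s n e fuel (c + 1) (m + 1) else m
    else m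

-- A's outer while loop: `end` counts down from n-1 and stops at 0.
def pvOuterA (s : List Char) (n : Nat) (e : Nat) (lst : List Int) : List Int :=
  match e with
  | 0 => lst
  | e + 1 =>
    let mts : Int := (pvInnerA s n (e + 1) n 0 0 : Int)
    let lst := lst.set (e + 1) mts
    let lst := if lst.getD (e + 1) 0 < lst.getD (e + 2) 0 then lst.set (e + 1) (lst.getD (e + 2) 0) else lst
    pvOuterA s n e lst

def matched_prefix (a_string : String) : List Int :=
  let s := a_string.toList
  let n := s.length
  let lst := List.replicate (n + 1) (0 : Int)
  let lst := pvOuterA s n (n - 1) lst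
  lst.set 0 (n : Int)

-- ===== PORT B =====
-- B's inner while loop (Z-box extension); indices in range for all reachable calls.
-- fuel (≥ n - (i+k) at every call) only makes the recursion structural; same computation
def pvExtendB (s : List Char) (n i : Nat) : Nat → Nat → Nat
  | 0, k => k
  | fuel + 1, k =>
    if i + k < n then
      if s.getD k ' ' = s.getD (i + k) ' ' then pvExtendB s n i fuel (k + 1) else k
    else k

-- one iteration of B's Z-algorithm for-loop; state (z, l, r); z values are naturally ≥ 0, kept as Nat
def pvZStep (s : List Char) (n : Nat) (st : List Nat × Nat × Nat) (i : Nat) : List Nat × Nat × Nat :=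
  let z := st.1
  let l := st.2.1
  let r := st.2.2
  let k0 := if i < r then min (r - i) (z.getD (i - l) 0) else 0
  let k := pvExtendB s n i n k0
  let z := z.set i k
  if r < i + k then (z, i, i + k) else (z, l, r)

-- B's backward suffix-max pass: for i in range(n-1, 0, -1)
def pvSuffixMax (z : List Nat) (e : Nat) (acc : Nat) (out : List Int) : List Int :=
  match e with
  | 0 => out
  | e + 1 =>
    let acc := max acc (z.getD (e + 1) 0)
    pvSuffixMax z e acc (out.set (e + 1) (acc : Int))

def matched_prefix_alt (a_string : String) : List Int :=
  let s := a_string.toList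
  let n := s.length
  let st := (List.range' 1 (n - 1)).foldl (pvZStep s n) (List.replicate (n + 1) 0, 0, 0)
  let out := pvSuffixMax st.1 (n - 1) 0 (List.replicate (n + 1) (0 : Int))
  out.set 0 (n : Int)

-- ===== PRECONDITION & SPEC =====
-- Pre_ excludes only the empty string, on which A raises IndexError (a_string[-1] in its inner loop).
def Pre_matched_prefix (a_string : String) : Prop := a_string ≠ ""
instance (a_string : String) : Decidable (Pre_matched_prefix a_string) := by unfold Pre_matched_prefix; infer_instance
def pvWitness_matched_prefix : String := "abab"

def Spec_matched_prefix (a_string : String) (out : List Int) : Prop := out = matched_prefix_alt a_string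
instance (a_string : String) (out : List Int) : Decidable (Spec_matched_prefix a_string out) := by unfold Spec_matched_prefix; infer_instance

-- ===== CLAIM (what is proved, stated in full; the proofs are below) =====
def Claim_equal_matched_prefix : Prop := ∀ (a_string : String), Dom_matched_prefix a_string → Pre_matched_prefix a_string → Spec_matched_prefix a_string (matched_prefix a_string)

-- ===== LEMMAS AND PROOFS =====

-- longest common prefix of two character lists
def pvLcp : List Char → List Char → Nat
  | a :: xs, b :: ys => if a = b then pvLcp xs ys + 1 else 0
  | _, _ => 0

-- the naive Z-value: length of the longest common prefix of s and s[i:]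
def pvZ (s : List Char) (i : Nat) : Nat := pvLcp s (s.drop i)

-- suffix maximum of Z-values over [e, n)
def pvM (s : List Char) (n e : Nat) : Nat :=
  if e < n then max (pvZ s e) (pvM s n (e + 1)) else 0
termination_by n - e

theorem pvLcp_le_right (xs ys : List Char) : pvLcp xs ys ≤ ys.length := by
  fun_induction pvLcp xs ys with
  | case1 xs b ys ih => simp only [List.length_cons]; omega
  | case2 a xs b ys h => simp
  | case3 t u h => simp


theorem pvLcp_match (xs ys : List Char) (d : Char) :
    ∀ j, j < pvLcp xs ys → xs.getD j d = ys.getD j d := by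
  fun_induction pvLcp xs ys with
  | case1 xs b ys ih =>
    intro j hj
    cases j with
    | zero => simp
    | succ j => simp only [List.getD_cons_succ]; exact ih j (by omega)
  | case2 a xs b ys h => intro j hj; omega
  | case3 t u h => intro j hj; omega


theorem pvLcp_mismatch (xs ys : List Char) (d : Char)
    (h1 : pvLcp xs ys < xs.length) (h2 : pvLcp xs ys < ys.length) :
    xs.getD (pvLcp xs ys) d ≠ ys.getD (pvLcp xs ys) d := by
  fun_induction pvLcp xs ys with
  | case1 xs b ys ih =>
    simp only [List.getD_cons_succ]
    exact ih (by simpa using h1) (by simpa using h2)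
  | case2 a xs b ys h => simpa using h
  | case3 t u h =>
    rcases t with _ | ⟨a, xs⟩
    · simp at h1
    · rcases u with _ | ⟨b, ys⟩
      · simp at h2
      · exact absurd (h a xs b ys rfl rfl) (fun h => h)


theorem pvLcp_ge (xs ys : List Char) (d : Char) (k : Nat)
    (h1 : k ≤ xs.length) (h2 : k ≤ ys.length)
    (h : ∀ j, j < k → xs.getD j d = ys.getD j d) : k ≤ pvLcp xs ys := by
  induction xs generalizing ys k with
  | nil => simp at h1; omega
  | cons a xs ih =>
    cases k with
    | zero => omega
    | succ k =>
      rcases ys with _ | ⟨b, ys⟩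
      · simp at h2
      · have hab : a = b := by simpa using h 0 (by omega)
        simp only [pvLcp, hab, if_pos]
        have := ih ys k (by simpa using h1) (by simpa using h2)
          (fun j hj => by simpa using h (j+1) (by omega))
        omega


theorem pvGetD_drop (s : List Char) (i j : Nat) (d : Char) :
    (s.drop i).getD j d = s.getD (i + j) d := by
  rw [List.getD_eq_getElem?_getD, List.getD_eq_getElem?_getD, List.getElem?_drop]


theorem pvZ_le (s : List Char) (i : Nat) : pvZ s i ≤ s.length - i := by
  have := pvLcp_le_right s (s.drop i)
  simpa [pvZ] using this


theorem pvZ_match (s : List Char) (i : Nat) (d : Char) :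
    ∀ j, j < pvZ s i → s.getD j d = s.getD (i + j) d := by
  intro j hj
  have := pvLcp_match s (s.drop i) d j hj
  rwa [pvGetD_drop] at this


theorem pvZ_mismatch (s : List Char) (i : Nat) (d : Char) (hi : 1 ≤ i)
    (h : i + pvZ s i < s.length) :
    s.getD (pvZ s i) d ≠ s.getD (i + pvZ s i) d := by
  have hle := pvZ_le s i
  have h1 : pvZ s i < s.length := by omega
  have h2 : pvZ s i < (s.drop i).length := by simp [List.length_drop]; omega
  have := pvLcp_mismatch s (s.drop i) d h1 h2
  rwa [pvGetD_drop] at this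


theorem pvZ_ge (s : List Char) (i : Nat) (d : Char) (k : Nat) (hi : 1 ≤ i)
    (h1 : i + k ≤ s.length)
    (h : ∀ j, j < k → s.getD j d = s.getD (i + j) d) : k ≤ pvZ s i := by
  have h2 : k ≤ (s.drop i).length := by simp [List.length_drop]; omega
  exact pvLcp_ge s (s.drop i) d k (by omega) h2
    (fun j hj => by rw [pvGetD_drop]; exact h j hj)


theorem pvExtendB_eq (s : List Char) (n i : Nat) (fuel k : Nat) (hn : n = s.length)
    (hi : 1 ≤ i) (hk : k ≤ pvZ s i) (hik : i + k ≤ n) (hfuel : n ≤ fuel + i + k) :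
    pvExtendB s n i fuel k = pvZ s i := by
  induction fuel generalizing k with
  | zero =>
    simp only [pvExtendB]
    have := pvZ_le s i
    omega
  | succ fuel ih =>
    simp only [pvExtendB]
    split_ifs with h1 h2
    · have hkz : k < pvZ s i := by
        by_contra hge
        have hk' : pvZ s i = k := by omega
        have hmm := pvZ_mismatch s i ' ' hi (by omega)
        rw [hk'] at hmm
        exact hmm h2
      exact ih (k + 1) (by omega) (by omega) (by omega)
    · have hle : pvZ s i ≤ k := by
        by_contra hlt
        exact h2 (pvZ_match s i ' ' k (by omega))
      omega
    · have := pvZ_le s i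
      omega

theorem pvInnerA_eq (s : List Char) (n e : Nat) (fuel c m : Nat) (hn : n = s.length)
    (he : 1 ≤ e) (hc : c ≤ pvZ s e) (hec : e + c ≤ n) (hfuel : n ≤ fuel + e + c) :
    pvInnerA s n e fuel c m = m + (pvZ s e - c) := by
  induction fuel generalizing c m with
  | zero =>
    simp only [pvInnerA]
    have := pvZ_le s e
    omega
  | succ fuel ih =>
    simp only [pvInnerA]
    split_ifs with h1 h2
    · have hkz : c < pvZ s e := by
        by_contra hge
        have hc' : pvZ s e = c := by omega
        have hmm := pvZ_mismatch s e ' ' he (by omega)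
        rw [hc'] at hmm
        exact hmm h2.symm
      rw [ih (c + 1) (m + 1) (by omega) (by omega) (by omega)]
      omega
    · have hle : pvZ s e ≤ c := by
        by_contra hlt
        exact h2 (pvZ_match s e ' ' c (by omega)).symm
      omega
    · have := pvZ_le s e
      omega

def pvInv (s : List Char) (n i : Nat) (st : List Nat × Nat × Nat) : Prop :=
  st.1.length = n + 1 ∧ (∀ j, 1 ≤ j → j < i → st.1.getD j 0 = pvZ s j) ∧
  ((st.2.1 = 0 ∧ st.2.2 = 0) ∨
   (1 ≤ st.2.1 ∧ st.2.1 < i ∧ st.2.2 = st.2.1 + pvZ s st.2.1 ∧ st.2.2 ≤ n))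

theorem pvGetD_set {α : Type} [Inhabited α] (l : List α) (i j : Nat) (v d : α) :
    (l.set i v).getD j d = if i = j ∧ i < l.length then v else l.getD j d := by
  rw [List.getD_eq_getElem?_getD, List.getD_eq_getElem?_getD, List.getElem?_set]
  by_cases hij : i = j
  · subst hij
    by_cases hlen : i < l.length
    · simp [hlen]
    · simp [hlen]
  · simp [hij]

theorem pvZStep_inv (s : List Char) (n i : Nat) (st : List Nat × Nat × Nat)
    (hn : n = s.length) (hi : 1 ≤ i) (hin : i < n) (h : pvInv s n i st) :
    pvInv s n (i + 1) (pvZStep s n st i) := by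
  obtain ⟨z, l, r⟩ := st
  obtain ⟨hlen, hz, hw⟩ := h
  simp only [pvInv] at *
  simp only [pvZStep]
  have hk0 : (if i < r then min (r - i) (z.getD (i - l) 0) else 0) ≤ pvZ s i ∧
      i + (if i < r then min (r - i) (z.getD (i - l) 0) else 0) ≤ n := by
    by_cases hir : i < r
    · rcases hw with ⟨hl0, hr0⟩ | ⟨hl1, hli, hr, hrn⟩
      · omega
      · have hzil : z.getD (i - l) 0 = pvZ s (i - l) := hz (i - l) (by omega) (by omega)
        rw [if_pos hir, hzil]
        refine ⟨pvZ_ge s i ' ' _ hi (by omega) ?_, by omega⟩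
        intro j hj
        have hj2 : j < pvZ s (i - l) := by omega
        have e1 := pvZ_match s (i - l) ' ' j hj2
        have e2 := pvZ_match s l ' ' ((i - l) + j) (by omega)
        have hll : l + ((i - l) + j) = i + j := by omega
        rw [hll] at e2
        rw [e1, ← e2]
    · rw [if_neg hir]; exact ⟨Nat.zero_le _, by omega⟩
  have hk : pvExtendB s n i n (if i < r then min (r - i) (z.getD (i - l) 0) else 0) = pvZ s i :=
    pvExtendB_eq s n i n _ hn hi hk0.1 hk0.2 (by omega)
  rw [hk]
  have hset : ∀ j, 1 ≤ j → j < i + 1 → (z.set i (pvZ s i)).getD j 0 = pvZ s j := by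
    intro j h1 h2
    rw [pvGetD_set]
    split_ifs with hc
    · rw [← hc.1]
    · have hji : j < i := by
        rcases Nat.lt_or_ge i z.length with hl | hl
        · have : i ≠ j := fun hh => hc ⟨hh, hl⟩
          omega
        · omega
      exact hz j h1 hji
  have hzlen : (z.set i (pvZ s i)).length = n + 1 := by rw [List.length_set, hlen]
  have hzle := pvZ_le s i
  split_ifs with hupd
  · dsimp only
    exact ⟨hzlen, hset, Or.inr ⟨hi, by omega, rfl, by omega⟩⟩
  · dsimp only
    refine ⟨hzlen, hset, ?_⟩
    rcases hw with ⟨hl0, hr0⟩ | ⟨hl1, hli, hr, hrn⟩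
    · exact Or.inl ⟨hl0, hr0⟩
    · exact Or.inr ⟨hl1, by omega, hr, hrn⟩

theorem pvZFold_inv (s : List Char) (n : Nat) (hn : n = s.length) :
    ∀ (m a : Nat) (st : List Nat × Nat × Nat), 1 ≤ a → a + m ≤ n → pvInv s n a st →
    pvInv s n (a + m) ((List.range' a m).foldl (pvZStep s n) st) := by
  intro m
  induction m with
  | zero => intro a st _ _ h; simpa using h
  | succ m ih =>
    intro a st ha hm h
    rw [List.range'_succ, List.foldl_cons]
    have h1 := pvZStep_inv s n a st hn ha (by omega) h
    have h2 := ih (a + 1) (pvZStep s n st a) (by omega) (by omega) h1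
    have : a + (m + 1) = (a + 1) + m := by omega
    rw [this]
    exact h2

theorem pvM_stop (s : List Char) (n e : Nat) (h : n ≤ e) : pvM s n e = 0 := by
  rw [pvM, if_neg (by omega)]

theorem pvM_go (s : List Char) (n e : Nat) (h : e < n) :
    pvM s n e = max (pvZ s e) (pvM s n (e + 1)) := by
  rw [pvM, if_pos h]

theorem pvGetD_replicate {α : Type} [Inhabited α] (m j : Nat) (d : α) :
    (List.replicate m d).getD j d = d := by
  induction m generalizing j with
  | zero => simp
  | succ m ih =>
    cases j with
    | zero => simp
    | succ j => simpa using ih j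

theorem pvOuterA_char (s : List Char) (n : Nat) (hn : n = s.length) :
    ∀ (e : Nat) (lst : List Int), e < n → lst.length = n + 1 →
    lst.getD (e + 1) 0 = (pvM s n (e + 1) : Int) →
    (pvOuterA s n e lst).length = n + 1 ∧
    (∀ j, 1 ≤ j → j ≤ e → (pvOuterA s n e lst).getD j 0 = (pvM s n j : Int)) ∧
    (∀ j, j = 0 ∨ e < j → (pvOuterA s n e lst).getD j 0 = lst.getD j 0) := by
  intro e
  induction e with
  | zero =>
    intro lst he hlen hnext
    simp only [pvOuterA]
    exact ⟨hlen, fun j h1 h2 => by omega, fun j _ => trivial⟩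
  | succ e ih =>
    intro lst he hlen hnext
    simp only [pvOuterA]
    have hzv : pvInnerA s n (e + 1) n 0 0 = pvZ s (e + 1) := by
      rw [pvInnerA_eq s n (e + 1) n 0 0 hn (by omega) (Nat.zero_le _) (by omega) (by omega)]
      omega
    rw [hzv]
    set lst1 := lst.set (e + 1) ((pvZ s (e + 1) : Int)) with hlst1
    have hlen1 : lst1.length = n + 1 := by rw [hlst1, List.length_set, hlen]
    have hg1 : lst1.getD (e + 1) 0 = ((pvZ s (e + 1) : Nat) : Int) := by
      rw [hlst1, pvGetD_set, if_pos ⟨rfl, by omega⟩]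
    have hg2 : lst1.getD (e + 2) 0 = (pvM s n (e + 2) : Int) := by
      rw [hlst1, pvGetD_set, if_neg (by omega)]
      exact hnext
    set lst2 := if lst1.getD (e + 1) 0 < lst1.getD (e + 2) 0
        then lst1.set (e + 1) (lst1.getD (e + 2) 0) else lst1 with hlst2
    have hlen2 : lst2.length = n + 1 := by
      rw [hlst2]; split_ifs <;> simp [List.length_set, hlen1]
    have hg3 : lst2.getD (e + 1) 0 = (pvM s n (e + 1) : Int) := by
      rw [pvM_go s n (e + 1) he, hlst2]
      split_ifs with hc
      · rw [pvGetD_set, if_pos ⟨rfl, by omega⟩, hg2]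
        rw [hg1, hg2] at hc
        have : max (pvZ s (e + 1)) (pvM s n (e + 2)) = pvM s n (e + 2) := by omega
        rw [this]
      · rw [hg1]
        rw [hg1, hg2] at hc
        have : max (pvZ s (e + 1)) (pvM s n (e + 2)) = pvZ s (e + 1) := by omega
        rw [this]
    have hg4 : ∀ j, j = 0 ∨ e + 1 < j → lst2.getD j 0 = lst.getD j 0 := by
      intro j hj
      have hne : ¬(e + 1 = j ∧ e + 1 < lst1.length) := by omega
      have hne' : ¬(e + 1 = j ∧ e + 1 < lst.length) := by omega
      rw [hlst2]
      split_ifs <;> rw [hlst1] <;>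
        first
        | rw [pvGetD_set, if_neg hne, pvGetD_set, if_neg hne']
        | rw [pvGetD_set, if_neg hne']
    obtain ⟨ha, hb, hc⟩ := ih lst2 (by omega) hlen2 (by simpa using hg3)
    refine ⟨ha, ?_, ?_⟩
    · intro j h1 h2
      rcases Nat.lt_or_ge j (e + 1) with hj | hj
      · exact hb j h1 (by omega)
      · have hje : j = e + 1 := by omega
        rw [hc j (Or.inr (by omega)), hje, hg3]
    · intro j hj
      rw [hc j (by omega), hg4 j (by omega)]

theorem pvSuffixMax_char (s : List Char) (n : Nat) (z : List Nat)
    (hz : ∀ j, 1 ≤ j → j < n → z.getD j 0 = pvZ s j) :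
    ∀ (e : Nat) (acc : Nat) (out : List Int), e < n → out.length = n + 1 →
    acc = pvM s n (e + 1) →
    (pvSuffixMax z e acc out).length = n + 1 ∧
    (∀ j, 1 ≤ j → j ≤ e → (pvSuffixMax z e acc out).getD j 0 = (pvM s n j : Int)) ∧
    (∀ j, j = 0 ∨ e < j → (pvSuffixMax z e acc out).getD j 0 = out.getD j 0) := by
  intro e
  induction e with
  | zero =>
    intro acc out he hout hacc
    simp only [pvSuffixMax]
    exact ⟨hout, fun j h1 h2 => by omega, fun j _ => trivial⟩
  | succ e ih =>
    intro acc out he hout hacc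
    simp only [pvSuffixMax]
    have hze : z.getD (e + 1) 0 = pvZ s (e + 1) := hz (e + 1) (by omega) he
    have hacc' : max acc (z.getD (e + 1) 0) = pvM s n (e + 1) := by
      rw [hze, hacc, pvM_go s n (e + 1) he]
      omega
    set out1 := out.set (e + 1) ((max acc (z.getD (e + 1) 0) : Nat) : Int) with hout1
    have hlen1 : out1.length = n + 1 := by rw [hout1, List.length_set, hout]
    obtain ⟨ha, hb, hc⟩ := ih (max acc (z.getD (e + 1) 0)) out1 (by omega) hlen1 hacc'
    refine ⟨ha, ?_, ?_⟩
    · intro j h1 h2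
      rcases Nat.lt_or_ge j (e + 1) with hj | hj
      · exact hb j h1 (by omega)
      · have hje : j = e + 1 := by omega
        rw [hc j (Or.inr (by omega)), hje, hout1, pvGetD_set, if_pos ⟨rfl, by omega⟩, hacc']
    · intro j hj
      rw [hc j (by omega), hout1, pvGetD_set, if_neg (by omega)]

theorem pvEq_of_getD (xs ys : List Int) (h : xs.length = ys.length)
    (hg : ∀ i, xs.getD i 0 = ys.getD i 0) : xs = ys := by
  apply List.ext_getElem h
  intro i h1 h2
  have := hg i
  rwa [List.getD_eq_getElem?_getD, List.getD_eq_getElem?_getD,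
    List.getElem?_eq_getElem h1, List.getElem?_eq_getElem h2] at this

-- ===== VERDICT (by name: the statement is the Claim_ definition above) =====
theorem matched_prefix_spec : Claim_equal_matched_prefix := by
  intro a hdom hpre
  simp only [Spec_matched_prefix]
  simp only [matched_prefix, matched_prefix_alt]
  set s := a.toList with hs
  have hne : s ≠ [] := by
    intro h
    have h2 := congrArg String.ofList h
    rw [String.ofList_toList] at h2
    exact hpre h2
  set n := s.length with hn
  have hn1 : 1 ≤ n := by
    have := List.length_pos_iff.mpr hne
    omega
  have he1 : n - 1 + 1 = n := by omega
  have hA := pvOuterA_char s n rfl (n - 1) (List.replicate (n + 1) 0) (by omega)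
    (by simp)
    (by rw [he1, pvGetD_replicate, pvM_stop s n n (le_refl n)]; rfl)
  have hinv0 : pvInv s n 1 (List.replicate (n + 1) 0, 0, 0) :=
    ⟨by simp, fun j h1 h2 => absurd h2 (by omega), Or.inl ⟨rfl, rfl⟩⟩
  have hinv := pvZFold_inv s n rfl (n - 1) 1 (List.replicate (n + 1) 0, 0, 0)
    (le_refl 1) (by omega) hinv0
  rw [show 1 + (n - 1) = n from by omega] at hinv
  obtain ⟨hzlen, hzv, _⟩ := hinv
  have hB := pvSuffixMax_char s n _ (fun j h1 h2 => hzv j h1 h2) (n - 1) 0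
    (List.replicate (n + 1) 0) (by omega) (by simp)
    (by rw [he1, pvM_stop s n n (le_refl n)])
  obtain ⟨hAlen, hAmid, hAout⟩ := hA
  obtain ⟨hBlen, hBmid, hBout⟩ := hB
  apply pvEq_of_getD
  · rw [List.length_set, List.length_set, hAlen, hBlen]
  · intro i
    rw [pvGetD_set, pvGetD_set]
    by_cases hi0 : i = 0
    · rw [if_pos ⟨hi0.symm, by omega⟩, if_pos ⟨hi0.symm, by omega⟩]
    · rw [if_neg (by omega), if_neg (by omega)]
      rcases Nat.lt_or_ge i n with hi | hi
      · rw [hAmid i (by omega) (by omega), hBmid i (by omega) (by omega)]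
      · rw [hAout i (Or.inr (by omega)), hBout i (Or.inr (by omega))]
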